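-- pv_equiv track=rewrite | github.com/wjdqudwn/cleverBuddy | emotion_model.py | join_sentence
-- ===== SOURCE A (Python) =====
-- def join_sentence(index_list, corpus):
--     result = []
--     for i in range(len(index_list)):
--         try:
--             result.append(" ".join(corpus[index_list[i]:index_list[i+1]]))
--         except IndexError:
--             result.append(corpus[index_list[-1] - 1])
--     return result
-- ===== SOURCE B (Python) =====
-- def join_sentence(index_list, corpus):
--     if not index_list:
--         return []
--     last_word = corpus[index_list[-1] - 1]
--
--     def go(lst):
--         a, rest = lst[0], lst[1:]
--         if not rest:
--             return [last_word]
--         return [" ".join(corpus[a:rest[0]])] + go(rest)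
--
--     return go(index_list)
-- ===== Notes on version B (the rewrite author's own statement) =====
-- stated objective: alternative
-- what changed: Replaces A's range-indexed loop with exception-driven detection of the final iteration by structural recursion on the index list (head plus tail), with the trailing word computed once up front; Pre_ excludes only inputs where A (and B) raise IndexError on corpus[index_list[-1]-1].
import Mathlib
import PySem

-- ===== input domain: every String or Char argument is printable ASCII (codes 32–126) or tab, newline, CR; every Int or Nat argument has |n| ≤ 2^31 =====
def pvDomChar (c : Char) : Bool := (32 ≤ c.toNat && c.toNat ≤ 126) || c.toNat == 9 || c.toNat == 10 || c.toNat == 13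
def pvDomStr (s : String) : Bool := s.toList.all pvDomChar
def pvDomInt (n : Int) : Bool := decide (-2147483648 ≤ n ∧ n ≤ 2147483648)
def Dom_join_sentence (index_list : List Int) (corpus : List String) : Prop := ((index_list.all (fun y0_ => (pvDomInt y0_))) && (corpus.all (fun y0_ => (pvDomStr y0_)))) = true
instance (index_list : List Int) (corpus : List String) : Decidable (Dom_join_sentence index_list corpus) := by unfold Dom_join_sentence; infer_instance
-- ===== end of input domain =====

-- B replaces A's range-indexed loop with exception-driven last-iteration detection by structural recursion on the index list, the trailing word computed once up front (objective: alternative).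


-- ===== PORT A =====
-- literal port of A: for i in range(len(index_list)): try append " ".join(corpus[il[i]:il[i+1]])
-- except IndexError (il[i+1] out of range): append corpus[il[-1]-1] (total via pyGetD, under Pre_)
def join_sentence (index_list : List Int) (corpus : List String) : List String :=
  (List.range index_list.length).foldl
    (fun (result : List String) (i : Nat) =>
      result ++
        [match PySem.List.pyGet? index_list ((i : Int) + 1) with
         | some b =>
             PySem.Str.join " "
               (PySem.List.slice corpus (some (PySem.List.pyGetD index_list (i : Int) 0)) (some b))
         | none =>
             PySem.List.pyGetD corpus (PySem.List.pyGetD index_list (-1) 0 - 1) ""])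
    []

-- ===== PORT B =====
-- literal port of B's inner 'go': recursion on lst = head a plus rest; if rest empty yield [last_word],
-- else the joined slice corpus[a:rest[0]] consed onto go(rest)
def joinGo (corpus : List String) (last_word : String) : List Int → List String
  | [] => []
  | [_] => [last_word]
  | a :: b :: rest =>
      PySem.Str.join " " (PySem.List.slice corpus (some a) (some b)) :: joinGo corpus last_word (b :: rest)

-- literal port of B: early return on empty, last_word = corpus[index_list[-1]-1] (total via pyGetD, under Pre_), then go
def join_sentence_alt (index_list : List Int) (corpus : List String) : List String :=
  if index_list = [] then []
  else joinGo corpus (PySem.List.pyGetD corpus (PySem.List.pyGetD index_list (-1) 0 - 1) "") index_list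

-- ===== PRECONDITION & SPEC =====
-- Pre_ excludes nonempty index lists whose last index points outside corpus: there Python A (and B)
-- raises IndexError on corpus[index_list[-1] - 1].
def Pre_join_sentence (index_list : List Int) (corpus : List String) : Prop :=
  index_list = [] ∨ PySem.Raise.InRange corpus.length (PySem.List.pyGetD index_list (-1) 0 - 1)
instance (index_list : List Int) (corpus : List String) : Decidable (Pre_join_sentence index_list corpus) := by unfold Pre_join_sentence; infer_instance
def pvWitness_join_sentence : List Int × List String := ([1, 3], ["a", "b", "c"])
def Spec_join_sentence (index_list : List Int) (corpus : List String) (out : List String) : Prop := out = join_sentence_alt index_list corpus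
instance (index_list : List Int) (corpus : List String) (out : List String) : Decidable (Spec_join_sentence index_list corpus out) := by unfold Spec_join_sentence; infer_instance

-- ===== CLAIM (what is proved, stated in full; the proofs are below) =====
def Claim_equal_join_sentence : Prop := ∀ (index_list : List Int) (corpus : List String), Dom_join_sentence index_list corpus → Pre_join_sentence index_list corpus → Spec_join_sentence index_list corpus (join_sentence index_list corpus)

-- ===== LEMMAS AND PROOFS =====

-- B's recursion, characterised: on a nonempty list it is the map over consecutive pairs plus the trailing word
theorem joinGo_eq (corpus : List String) (w : String) :
    ∀ (il : List Int) (a : Int),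
      joinGo corpus w (a :: il) =
        ((a :: il).zip il).map
          (fun ab => PySem.Str.join " " (PySem.List.slice corpus (some ab.1) (some ab.2))) ++ [w] := by
  intro il
  induction il with
  | nil => intro a; simp [joinGo]
  | cons b rest ih => intro a; simp [joinGo, ih b]

-- ===== VERDICT (by name: the statement is the Claim_ definition above) =====
-- A's loop appends one element per index: rewrite it as a map over range, then align with B's recursion via joinGo_eq.
theorem join_sentence_spec : Claim_equal_join_sentence := by
  intro il corpus _ _
  unfold Spec_join_sentence join_sentence join_sentence_alt
  rw [PySem.List.foldl_append_singleton_eq_map]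
  by_cases hil : il = []
  · simp [hil]
  · simp only [List.nil_append, hil, if_false]
    obtain ⟨a, tl, rfl⟩ : ∃ a tl, il = a :: tl := by
      cases il with
      | nil => exact absurd rfl hil
      | cons a tl => exact ⟨a, tl, rfl⟩
    rw [joinGo_eq]
    obtain ⟨m, hm⟩ : ∃ m, (a :: tl).length = m + 1 := ⟨tl.length, by simp⟩
    rw [hm, List.range_succ, List.map_append, List.map_singleton]
    congr 1
    · -- the m paired iterations: index i pairs il[i] with il[i+1], exactly B's pair of consecutive entries
      apply List.ext_getElem
      · simp at hm; simp [hm]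
      · intro i h1 h2
        simp only [List.getElem_map, List.getElem_range, List.getElem_zip]
        have hi : i < m := by simpa using h1
        have hlen : (a :: tl).length = m + 1 := hm
        have hcast : (i : Int) + 1 = ((i + 1 : Nat) : Int) := by push_cast; ring
        simp only [hcast, PySem.List.pyGet?_natCast, PySem.List.pyGetD_natCast]
        rw [List.getElem?_eq_getElem (by omega)]
        simp [List.getD, List.getElem?_eq_getElem (show i < (a :: tl).length by omega)]
    · -- the last iteration: il[m+1] is out of range, A's except branch = B's last_word
      have hcast : ((m : Int) + 1) = ((m + 1 : Nat) : Int) := by push_cast; ring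
      rw [hcast, PySem.List.pyGet?_natCast, List.getElem?_eq_none (le_of_eq hm)]
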